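-- pv_equiv track=rewrite | github.com/Griffiniskid/IlyonAI | IlyonAi-Wallet-assistant-main/server/app/api/endpoints.py | _split_wallet_context
-- ===== SOURCE A (Python) =====
-- from typing import Any, List, Optional
--
-- def _split_wallet_context(user_address: str, solana_address: Optional[str]) -> tuple[str, str]:
--     evm_wallet = ""
--     sol_wallet = ""
--     for raw in (user_address or "", solana_address or ""):
--         for part in [p.strip() for p in str(raw).split(",") if p.strip()]:
--             if part.startswith("0x") and len(part) == 42 and not evm_wallet:
--                 evm_wallet = part
--             elif not part.startswith("0x") and len(part) >= 32 and not sol_wallet: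
--                 sol_wallet = part
--     return evm_wallet, sol_wallet
-- ===== SOURCE B (Python) =====
-- from typing import Optional
--
-- def _split_wallet_context(user_address: str, solana_address: Optional[str]) -> tuple[str, str]:
--     parts = []
--     for raw in (user_address or "", solana_address or ""):
--         parts += [p.strip() for p in str(raw).split(",") if p.strip()]
--     evm = next((p for p in parts if p.startswith("0x") and len(p) == 42), "")
--     sol = next((p for p in parts if not p.startswith("0x") and len(p) >= 32), "")
--     return evm, sol
-- ===== Notes on version B (the rewrite author's own statement) =====
-- stated objective: simpler
-- what changed: Instead of one stateful pass updating two empty-checked accumulator flags, B builds the flattened list of stripped comma-parts once and picks each wallet with an independent first-match (next) scan over it.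
import Mathlib
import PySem

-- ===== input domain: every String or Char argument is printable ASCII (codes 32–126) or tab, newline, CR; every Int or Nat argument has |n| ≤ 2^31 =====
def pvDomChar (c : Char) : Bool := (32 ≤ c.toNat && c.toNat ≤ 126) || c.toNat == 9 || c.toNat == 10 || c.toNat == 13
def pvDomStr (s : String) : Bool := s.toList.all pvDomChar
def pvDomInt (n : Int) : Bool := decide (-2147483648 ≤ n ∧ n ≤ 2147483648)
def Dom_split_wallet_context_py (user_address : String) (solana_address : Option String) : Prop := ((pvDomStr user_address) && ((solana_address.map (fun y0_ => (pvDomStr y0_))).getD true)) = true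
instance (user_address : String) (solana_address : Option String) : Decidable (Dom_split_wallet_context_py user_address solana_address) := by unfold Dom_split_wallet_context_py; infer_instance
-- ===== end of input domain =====

-- ===== PORT A =====
-- B replaces A's single stateful pass (two empty-checked accumulators) with a
-- pre-built flattened parts list and two independent first-match scans (simpler).
-- raw.split(",")  (sep "," is nonempty, so split? always returns a value)
def pvSplit (raw : String) : List String :=
  (PySem.Str.split? raw ",").getD []

-- A's inner loop step: update (evm_wallet, sol_wallet) from one stripped part.
def pvStepA (st : String × String) (part : String) : String × String :=
  if PySem.Str.startswith part "0x" && (PySem.Str.len part == 42) && (st.1 == "") then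
    (part, st.2)
  else if !PySem.Str.startswith part "0x" && (32 ≤ PySem.Str.len part) && (st.2 == "") then
    (st.1, part)
  else st

-- [p.strip() for p in raw.split(",") if p.strip()]
def pvPartsA (raw : String) : List String :=
  ((pvSplit raw).filter (fun p => PySem.Str.strip p ≠ "")).map PySem.Str.strip

def split_wallet_context_py (user_address : String) (solana_address : Option String) : String × String :=
  [user_address, solana_address.getD ""].foldl
    (fun st raw => (pvPartsA raw).foldl pvStepA st) ("", "")

-- ===== PORT B =====
def pvIsEvm (p : String) : Bool :=
  PySem.Str.startswith p "0x" && (PySem.Str.len p == 42)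

def pvIsSol (p : String) : Bool :=
  !PySem.Str.startswith p "0x" && (32 ≤ PySem.Str.len p)

-- parts += [p.strip() for p in raw.split(",") if p.strip()]
def pvPartsB (raw : String) : List String :=
  ((pvSplit raw).map PySem.Str.strip).filter (fun p => p ≠ "")

def split_wallet_context_py_alt (user_address : String) (solana_address : Option String) : String × String :=
  let parts := [user_address, solana_address.getD ""].flatMap pvPartsB
  ((parts.find? pvIsEvm).getD "", (parts.find? pvIsSol).getD "")

-- ===== PRECONDITION & SPEC =====
def Spec_split_wallet_context_py (user_address : String) (solana_address : Option String) (out : String × String) : Prop := out = split_wallet_context_py_alt user_address solana_address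
instance (user_address : String) (solana_address : Option String) (out : String × String) : Decidable (Spec_split_wallet_context_py user_address solana_address out) := by unfold Spec_split_wallet_context_py; infer_instance

-- ===== CLAIM (what is proved, stated in full; the proofs are below) =====
def Claim_equal_split_wallet_context_py : Prop := ∀ (user_address : String) (solana_address : Option String), Dom_split_wallet_context_py user_address solana_address → Spec_split_wallet_context_py user_address solana_address (split_wallet_context_py user_address solana_address)

-- ===== LEMMAS AND PROOFS =====

-- The two ways of building a raw's parts list coincide.
theorem pvParts_eq (raw : String) : pvPartsA raw = pvPartsB raw := by
  simp [pvPartsA, pvPartsB, List.filter_map, Function.comp_def]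

-- A's step, written with B's predicates.
theorem pvStepA_eq (st : String × String) (p : String) :
    pvStepA st p =
      if pvIsEvm p ∧ st.1 = "" then (p, st.2)
      else if pvIsSol p ∧ st.2 = "" then (st.1, p) else st := by
  simp [pvStepA, pvIsEvm, pvIsSol, and_assoc]

-- A's accumulator fold computes, componentwise, the first match of each predicate.
theorem pvFold_eq (parts : List String) (e s : String) :
    parts.foldl pvStepA (e, s) =
      ((if e = "" then (parts.find? pvIsEvm).getD "" else e),
       (if s = "" then (parts.find? pvIsSol).getD "" else s)) := by
  induction parts generalizing e s with
  | nil => simp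
  | cons p rest ih =>
    rw [List.foldl_cons, pvStepA_eq]
    by_cases hP : pvIsEvm p = true
    · have hQ : ¬ pvIsSol p = true := by
        intro h
        have h2 := hP
        simp only [pvIsEvm, pvIsSol, Bool.and_eq_true, Bool.not_eq_true'] at h2 h
        rw [h2.1] at h
        simp at h
      have hpne : p ≠ "" := by intro h; rw [h] at hP; exact absurd hP (by decide)
      rw [List.find?_cons_of_pos hP, List.find?_cons_of_neg hQ]
      by_cases he : e = ""
      · simp [he, hP, ih, hpne]
      · simp [he, hP, hQ, ih]
    · rw [List.find?_cons_of_neg hP]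
      by_cases hQ : pvIsSol p = true
      · have hpne : p ≠ "" := by intro h; rw [h] at hQ; exact absurd hQ (by decide)
        rw [List.find?_cons_of_pos hQ]
        by_cases hs : s = ""
        · simp [hP, hQ, hs, ih, hpne]
        · simp [hP, hQ, hs, ih]
      · rw [List.find?_cons_of_neg hQ]
        simp [hP, hQ, ih]

-- ===== VERDICT (by name: the statement is the Claim_ definition above) =====
theorem split_wallet_context_py_spec : Claim_equal_split_wallet_context_py := by
  intro u s _
  show split_wallet_context_py u s = split_wallet_context_py_alt u s
  simp only [split_wallet_context_py, split_wallet_context_py_alt, List.foldl_cons,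
    List.foldl_nil, pvParts_eq, ← List.foldl_append, List.flatMap_cons, List.flatMap_nil,
    List.append_nil]
  rw [pvFold_eq]
  simp
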